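-- pv_equiv track=rewrite | github.com/JackMengQY/Taste_Preference_Demo | taste-profile-demo/app/app.py | dish_recs_from_profile
-- ===== SOURCE A (Python) =====
-- def dish_recs_from_profile(strong, moderate, low):
--     strong_keys = {e["key"] for e in strong}
--     recs = []
--     if "protein_forward" in strong_keys and "umami" in strong_keys:
--         recs += ["Pho with beef or chicken", "Ramen (tonkotsu/shoyu)", "Grilled steak or chicken entree", "Teriyaki salmon", "Cheeseburger with cheddar"]
--     if "crispy" in strong_keys: recs += ["Crispy chicken sandwich", "Fish & chips", "Tempura appetizer"]
--     if "creamy" in strong_keys: recs += ["Creamy pasta (alfredo/carbonara)", "Katsu curry", "Creamy risotto"]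
--     if "fresh_clean" in strong_keys: recs += ["Sashimi platter", "Mediterranean salad bowls"]
--     if "sweet" in strong_keys: recs += ["Gelato, matcha parfait, or crème brûlée"]
--     # dedup
--     seen=set(); out=[]
--     for r in recs:
--         if r not in seen: seen.add(r); out.append(r)
--     return out[:8] or ["Try a mixed flight of small plates to explore more dimensions."]
-- ===== SOURCE B (Python) =====
-- # Flat per-dish catalogue: each dish carries its own required-key tuple; output is a
-- # single filter over the catalogue (no recs accumulation, no dedup pass needed since
-- # every dish appears once in the catalogue).
-- _DISHES = [
--     ("Pho with beef or chicken", ("protein_forward", "umami")),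
--     ("Ramen (tonkotsu/shoyu)", ("protein_forward", "umami")),
--     ("Grilled steak or chicken entree", ("protein_forward", "umami")),
--     ("Teriyaki salmon", ("protein_forward", "umami")),
--     ("Cheeseburger with cheddar", ("protein_forward", "umami")),
--     ("Crispy chicken sandwich", ("crispy",)),
--     ("Fish & chips", ("crispy",)),
--     ("Tempura appetizer", ("crispy",)),
--     ("Creamy pasta (alfredo/carbonara)", ("creamy",)),
--     ("Katsu curry", ("creamy",)),
--     ("Creamy risotto", ("creamy",)),
--     ("Sashimi platter", ("fresh_clean",)),
--     ("Mediterranean salad bowls", ("fresh_clean",)),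
--     ("Gelato, matcha parfait, or crème brûlée", ("sweet",)),
-- ]
--
-- def dish_recs_from_profile(strong, moderate, low):
--     keys = {e["key"] for e in strong}
--     out = [d for d, req in _DISHES if all(k in keys for k in req)][:8]
--     return out or ["Try a mixed flight of small plates to explore more dimensions."]
-- ===== Notes on version B (the rewrite author's own statement) =====
-- stated objective: alternative
-- what changed: Replaces A's branch-wise list accumulation followed by a seen-set dedup loop with a single filter over a flat per-dish catalogue (each dish paired with its required keys); the dedup pass disappears entirely because each dish occurs once in the catalogue.
import Mathlib
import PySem

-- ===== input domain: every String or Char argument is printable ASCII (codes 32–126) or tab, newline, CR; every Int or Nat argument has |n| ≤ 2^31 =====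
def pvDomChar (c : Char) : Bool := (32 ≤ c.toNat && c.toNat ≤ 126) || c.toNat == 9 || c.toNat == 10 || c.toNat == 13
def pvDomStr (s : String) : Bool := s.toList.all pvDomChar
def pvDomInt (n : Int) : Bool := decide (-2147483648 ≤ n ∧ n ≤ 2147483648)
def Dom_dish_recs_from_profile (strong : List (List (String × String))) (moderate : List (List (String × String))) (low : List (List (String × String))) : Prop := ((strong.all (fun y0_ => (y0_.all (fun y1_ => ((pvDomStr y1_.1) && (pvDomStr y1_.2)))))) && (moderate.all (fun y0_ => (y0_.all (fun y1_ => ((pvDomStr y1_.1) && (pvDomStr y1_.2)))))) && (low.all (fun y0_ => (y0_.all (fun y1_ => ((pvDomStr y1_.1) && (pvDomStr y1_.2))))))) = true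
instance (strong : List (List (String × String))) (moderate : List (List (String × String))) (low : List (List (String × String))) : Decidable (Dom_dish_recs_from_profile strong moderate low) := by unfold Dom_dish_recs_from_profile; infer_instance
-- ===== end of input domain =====

-- B replaces A's branch-wise accumulation + seen-set dedup loop with one filter over a flat
-- per-dish catalogue (dish paired with its required keys); objective: alternative.

-- ===== PORT A =====
-- strong_keys = {e["key"] for e in strong}; e["key"] ported as getD "" — exact under Pre_ (KeyError excluded)
def dish_recs_from_profile (strong : List (List (String × String))) (moderate : List (List (String × String))) (low : List (List (String × String))) : List String :=
  let strong_keys : PySem.Set String :=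
    strong.foldl (fun s e => PySem.Set.add s ((PySem.Dict.ofList e).getD "key" "")) PySem.Set.empty
  let recs : List String := []
  let recs := if PySem.Set.contains strong_keys "protein_forward" && PySem.Set.contains strong_keys "umami" then recs ++ ["Pho with beef or chicken", "Ramen (tonkotsu/shoyu)", "Grilled steak or chicken entree", "Teriyaki salmon", "Cheeseburger with cheddar"] else recs
  let recs := if PySem.Set.contains strong_keys "crispy" then recs ++ ["Crispy chicken sandwich", "Fish & chips", "Tempura appetizer"] else recs
  let recs := if PySem.Set.contains strong_keys "creamy" then recs ++ ["Creamy pasta (alfredo/carbonara)", "Katsu curry", "Creamy risotto"] else recs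
  let recs := if PySem.Set.contains strong_keys "fresh_clean" then recs ++ ["Sashimi platter", "Mediterranean salad bowls"] else recs
  let recs := if PySem.Set.contains strong_keys "sweet" then recs ++ ["Gelato, matcha parfait, or crème brûlée"] else recs
  -- dedup loop with seen-set and out-list
  let p := recs.foldl (fun (p : PySem.Set String × List String) r =>
    if PySem.Set.contains p.1 r then p else (PySem.Set.add p.1 r, p.2 ++ [r])) (PySem.Set.empty, [])
  let out8 := PySem.List.slice p.2 none (some 8)
  if out8 = [] then ["Try a mixed flight of small plates to explore more dimensions."] else out8

-- ===== PORT B =====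
def pvDishes : List (String × List String) :=
  [ ("Pho with beef or chicken", ["protein_forward", "umami"]),
    ("Ramen (tonkotsu/shoyu)", ["protein_forward", "umami"]),
    ("Grilled steak or chicken entree", ["protein_forward", "umami"]),
    ("Teriyaki salmon", ["protein_forward", "umami"]),
    ("Cheeseburger with cheddar", ["protein_forward", "umami"]),
    ("Crispy chicken sandwich", ["crispy"]),
    ("Fish & chips", ["crispy"]),
    ("Tempura appetizer", ["crispy"]),
    ("Creamy pasta (alfredo/carbonara)", ["creamy"]),
    ("Katsu curry", ["creamy"]),
    ("Creamy risotto", ["creamy"]),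
    ("Sashimi platter", ["fresh_clean"]),
    ("Mediterranean salad bowls", ["fresh_clean"]),
    ("Gelato, matcha parfait, or crème brûlée", ["sweet"]) ]

def dish_recs_from_profile_alt (strong : List (List (String × String))) (moderate : List (List (String × String))) (low : List (List (String × String))) : List String :=
  let keys : PySem.Set String :=
    strong.foldl (fun s e => PySem.Set.add s ((PySem.Dict.ofList e).getD "key" "")) PySem.Set.empty
  let out := PySem.List.slice
    ((pvDishes.filter (fun p => p.2.all (fun k => PySem.Set.contains keys k))).map Prod.fst)
    none (some 8)
  if out = [] then ["Try a mixed flight of small plates to explore more dimensions."] else out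

-- ===== PRECONDITION & SPEC =====
-- Pre_ excludes inputs where some dict in strong lacks the "key" key: A raises KeyError there.
def Pre_dish_recs_from_profile (strong : List (List (String × String))) (moderate : List (List (String × String))) (low : List (List (String × String))) : Prop :=
  ∀ e ∈ strong, (PySem.Dict.ofList e).contains "key" = true
instance (strong : List (List (String × String))) (moderate : List (List (String × String))) (low : List (List (String × String))) : Decidable (Pre_dish_recs_from_profile strong moderate low) := by unfold Pre_dish_recs_from_profile; infer_instance

def pvWitness_dish_recs_from_profile : (List (List (String × String))) × (List (List (String × String))) × (List (List (String × String))) :=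
  ([[("key", "crispy")], [("key", "sweet")]], [], [])

def Spec_dish_recs_from_profile (strong : List (List (String × String))) (moderate : List (List (String × String))) (low : List (List (String × String))) (out : List String) : Prop := out = dish_recs_from_profile_alt strong moderate low
instance (strong : List (List (String × String))) (moderate : List (List (String × String))) (low : List (List (String × String))) (out : List String) : Decidable (Spec_dish_recs_from_profile strong moderate low out) := by unfold Spec_dish_recs_from_profile; infer_instance

-- ===== CLAIM (what is proved, stated in full; the proofs are below) =====
def Claim_equal_dish_recs_from_profile : Prop := ∀ (strong : List (List (String × String))) (moderate : List (List (String × String))) (low : List (List (String × String))), Dom_dish_recs_from_profile strong moderate low → Pre_dish_recs_from_profile strong moderate low → Spec_dish_recs_from_profile strong moderate low (dish_recs_from_profile strong moderate low)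

-- ===== LEMMAS AND PROOFS =====

theorem pv_core (K : PySem.Set String) :
    (let recs : List String := []
     let recs := if PySem.Set.contains K "protein_forward" && PySem.Set.contains K "umami" then recs ++ ["Pho with beef or chicken", "Ramen (tonkotsu/shoyu)", "Grilled steak or chicken entree", "Teriyaki salmon", "Cheeseburger with cheddar"] else recs
     let recs := if PySem.Set.contains K "crispy" then recs ++ ["Crispy chicken sandwich", "Fish & chips", "Tempura appetizer"] else recs
     let recs := if PySem.Set.contains K "creamy" then recs ++ ["Creamy pasta (alfredo/carbonara)", "Katsu curry", "Creamy risotto"] else recs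
     let recs := if PySem.Set.contains K "fresh_clean" then recs ++ ["Sashimi platter", "Mediterranean salad bowls"] else recs
     let recs := if PySem.Set.contains K "sweet" then recs ++ ["Gelato, matcha parfait, or crème brûlée"] else recs
     let p := recs.foldl (fun (p : PySem.Set String × List String) r =>
       if PySem.Set.contains p.1 r then p else (PySem.Set.add p.1 r, p.2 ++ [r])) (PySem.Set.empty, [])
     let out8 := PySem.List.slice p.2 none (some 8)
     if out8 = [] then ["Try a mixed flight of small plates to explore more dimensions."] else out8)
    =
    (let out := PySem.List.slice
       ((pvDishes.filter (fun p => p.2.all (fun k => PySem.Set.contains K k))).map Prod.fst)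
       none (some 8)
     if out = [] then ["Try a mixed flight of small plates to explore more dimensions."] else out) := by
  by_cases h1 : PySem.Set.contains K "protein_forward" = true <;>
  by_cases h2 : PySem.Set.contains K "umami" = true <;>
  by_cases h3 : PySem.Set.contains K "crispy" = true <;>
  by_cases h4 : PySem.Set.contains K "creamy" = true <;>
  by_cases h5 : PySem.Set.contains K "fresh_clean" = true <;>
  by_cases h6 : PySem.Set.contains K "sweet" = true <;>
  simp only [Bool.not_eq_true] at h1 h2 h3 h4 h5 h6 <;>
  simp only [pvDishes, h1, h2, h3, h4, h5, h6, List.filter, List.all_cons, List.all_nil,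
    Bool.and_true, Bool.and_false, if_true] <;>
  decide

-- ===== VERDICT (by name: the statement is the Claim_ definition above) =====
theorem dish_recs_from_profile_spec : Claim_equal_dish_recs_from_profile := by
  intro strong moderate low _ _
  unfold Spec_dish_recs_from_profile dish_recs_from_profile dish_recs_from_profile_alt
  exact pv_core _
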